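-- pv_equiv track=rewrite | github.com/woojin444/Advent-of-Code-2024 | d7p2.py | generate_permutations
-- ===== SOURCE A (Python) =====
-- from itertools import product
--
-- def generate_permutations(lst):
--     # Extract numbers and operators
--     numbers = lst[::2]   # Every other element, starting from index 0
--     operators = lst[1::2]  # Every other element, starting from index 1
--
--     # Generate all possible combinations of "+" and "*"
--     possible_operators = list(product(["+", "*", "||"], repeat=len(operators)))
--
--     permutations = []
--     for ops in possible_operators:
--         perm = []
--         for i in range(len(numbers)):
--             perm.append(numbers[i])
--             if i < len(ops):
--                 perm.append(ops[i])
--         permutations.append(perm)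
--
--     return permutations
-- ===== SOURCE B (Python) =====
-- def generate_permutations(lst):
--     # Recursive decomposition: peel the first number (and its operator slot),
--     # generate all interleavings of the rest, and prefix each of the three
--     # operator choices (outer) over each suffix (inner), so the first operator
--     # stays most significant, exactly like product's order.
--     if not lst:
--         return [[]]
--     if len(lst) == 1:
--         return [[lst[0]]]
--     head = lst[0]
--     rest = generate_permutations(lst[2:])
--     return [[head, op] + r for op in ["+", "*", "||"] for r in rest]
-- ===== Notes on version B (the rewrite author's own statement) =====
-- stated objective: simpler
-- what changed: Replaces the itertools.product enumeration of operator tuples plus an index-driven interleaving loop by a single structural recursion that peels two elements at a time and prefixes [number, op] for each of the three operators onto every recursively built suffix.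
import Mathlib
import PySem

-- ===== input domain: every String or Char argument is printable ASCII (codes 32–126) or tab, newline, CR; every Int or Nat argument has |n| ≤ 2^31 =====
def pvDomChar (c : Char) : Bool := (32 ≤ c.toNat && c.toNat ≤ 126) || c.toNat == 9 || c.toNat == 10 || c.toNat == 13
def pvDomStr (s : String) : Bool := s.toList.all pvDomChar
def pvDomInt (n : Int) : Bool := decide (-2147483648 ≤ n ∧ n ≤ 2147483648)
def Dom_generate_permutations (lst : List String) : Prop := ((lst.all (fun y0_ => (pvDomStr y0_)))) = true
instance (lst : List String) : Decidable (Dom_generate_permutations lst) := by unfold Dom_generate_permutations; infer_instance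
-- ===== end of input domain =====

-- B replaces A's itertools.product-then-index-interleave double loop by a direct
-- structural recursion peeling two elements at a time (objective: simpler; same cost).

-- ===== PORT A =====
-- port of list(itertools.product(["+", "*", "||"], repeat=k)) in product's documented order
def pvProduct3 : Nat → List (List String)
  | 0 => [[]]
  | k + 1 => (["+", "*", "||"]).flatMap (fun o => (pvProduct3 k).map (o :: ·))

def generate_permutations (lst : List String) : List (List String) :=
  let numbers := (PySem.List.slice? lst none none 2).getD []
  let operators := (PySem.List.slice? lst (some 1) none 2).getD []
  let possible_operators := pvProduct3 operators.length
  possible_operators.foldl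
    (fun permutations ops =>
      let perm := (PySem.List.pyRange 0 (numbers.length : Int) 1).foldl
        (fun perm i =>
          let perm := perm ++ [PySem.List.pyGetD numbers i ""]
          if i < (ops.length : Int) then perm ++ [PySem.List.pyGetD ops i ""] else perm)
        []
      permutations ++ [perm])
    []

-- ===== PORT B =====
def generate_permutations_alt : List String → List (List String)
  | [] => [[]]
  | [x] => [[x]]
  | x :: _ :: rest =>
      (["+", "*", "||"]).flatMap (fun op =>
        (generate_permutations_alt rest).map (fun r => [x, op] ++ r))

-- ===== PRECONDITION & SPEC =====
def Spec_generate_permutations (lst : List String) (out : List (List String)) : Prop :=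
  out = generate_permutations_alt lst
instance (lst : List String) (out : List (List String)) : Decidable (Spec_generate_permutations lst out) := by
  unfold Spec_generate_permutations; infer_instance

-- ===== CLAIM =====
def Claim_equal_generate_permutations : Prop :=
  ∀ (lst : List String), Dom_generate_permutations lst →
    Spec_generate_permutations lst (generate_permutations lst)

-- ===== LEMMAS AND PROOFS =====
-- proof helpers: the two stride-2 slices and A's interleaving loop as structural recursions
def pvEvens : List String → List String
  | [] => []
  | [a] => [a]
  | a :: _ :: r => a :: pvEvens r

def pvOdds : List String → List String
  | [] => []
  | [_] => []
  | _ :: b :: r => b :: pvOdds r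

def pvInterleave : List String → List String → List String
  | [], _ => []
  | n :: ns, [] => n :: pvInterleave ns []
  | n :: ns, o :: os => n :: o :: pvInterleave ns os

lemma pv_slice_even (xs : List String) :
    PySem.List.slice? xs none none 2 = some (pvEvens xs) := by
  induction xs using pvEvens.induct with
  | case1 => decide
  | case2 a => simp [PySem.List.slice?, PySem.List.sliceIndices, pvEvens]
  | case3 a b r ih =>
    norm_num [PySem.List.slice?, PySem.List.sliceIndices, pvEvens] at ih ⊢
    have hc : (if (0:Int) ≤ (r.length:Int) + 1 then (((r.length:Int) + 1 + 1 + 2 - 1) / 2).toNat else 0)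
        = (if 0 < r.length then (((r.length:Int) + 2 - 1) / 2).toNat else 0) + 1 := by
      split_ifs <;> omega
    rw [hc, List.range_succ_eq_map, List.filterMap_cons]
    norm_num
    rw [← ih]
    apply List.filterMap_congr
    intro k _
    have h2 : (2 * ((k : Int) + 1)).toNat = 2 * k + 2 := by omega
    have h3 : (2 * (k : Int)).toNat = 2 * k := by omega
    simp [h2, h3]

lemma pv_slice_odd (xs : List String) :
    PySem.List.slice? xs (some 1) none 2 = some (pvOdds xs) := by
  induction xs using pvOdds.induct with
  | case1 => decide
  | case2 a => simp [PySem.List.slice?, PySem.List.sliceIndices, pvOdds]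
  | case3 a b r ih =>
    norm_num [PySem.List.slice?, PySem.List.sliceIndices, pvOdds] at ih ⊢
    rcases r with _ | ⟨c, t⟩
    · simp [pvOdds]
    · norm_num at ih ⊢
      have hm2 : min (1:Int) ((t.length:Int) + 1 + 1 + 1) = 1 := by omega
      rw [hm2]
      have hc : (((t.length:Int) + 1 + 1 + 1 - 1 + 2 - 1) / 2).toNat
          = (if 0 < t.length then (((t.length:Int) + 2 - 1) / 2).toNat else 0) + 1 := by
        split_ifs <;> omega
      rw [hc, List.range_succ_eq_map, List.filterMap_cons]
      norm_num
      rw [← ih]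
      apply List.filterMap_congr
      intro k _
      have h2 : (1 + 2 * ((k : Int) + 1)).toNat = 2 * k + 3 := by omega
      have h3 : (1 + 2 * (k : Int)).toNat = 2 * k + 1 := by omega
      simp [h2, h3]

lemma pv_build_loop (ns ops : List String) (d : Nat) :
    ∀ (j : Nat), j + d = ns.length → ∀ (acc : List String),
    (PySem.List.pyRange (j : Int) ((ns.length : Nat) : Int) 1).foldl
      (fun perm i =>
        let perm := perm ++ [PySem.List.pyGetD ns i ""]
        if i < (ops.length : Int) then perm ++ [PySem.List.pyGetD ops i ""] else perm)
      acc
    = acc ++ pvInterleave (ns.drop j) (ops.drop j) := by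
  induction d with
  | zero =>
    intro j hj acc
    rw [PySem.List.pyRange_one_eq_nil (by omega)]
    rw [List.drop_of_length_le (by omega)]
    simp [pvInterleave]
  | succ d ih =>
    intro j hj acc
    have hjlt : j < ns.length := by omega
    rw [PySem.List.pyRange_one_cons (by exact_mod_cast hjlt)]
    have hcast : ((j : Int) + 1) = ((j + 1 : Nat) : Int) := by push_cast; ring
    simp only [List.foldl_cons]
    rw [hcast, ih (j+1) (by omega)]
    rw [List.drop_eq_getElem_cons hjlt]
    by_cases hop : j < ops.length
    · rw [if_pos (by exact_mod_cast hop)]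
      rw [List.drop_eq_getElem_cons hop]
      simp [PySem.List.pyGetD_natCast, List.getD_eq_getElem?_getD, hjlt, hop, pvInterleave]
    · rw [if_neg (by simp; omega)]
      rw [List.drop_of_length_le (l := ops) (i := j) (by omega), List.drop_of_length_le (l := ops) (i := j+1) (by omega)]
      simp [PySem.List.pyGetD_natCast, List.getD_eq_getElem?_getD, hjlt, pvInterleave]

lemma pv_A_char (lst : List String) :
    generate_permutations lst
      = (pvProduct3 (pvOdds lst).length).map (fun ops => pvInterleave (pvEvens lst) ops) := by
  unfold generate_permutations
  rw [pv_slice_even, pv_slice_odd]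
  simp only [Option.getD_some]
  rw [PySem.List.foldl_append_singleton_eq_map]
  apply List.map_congr_left
  intro ops _
  have h := pv_build_loop (pvEvens lst) ops (pvEvens lst).length 0 (by omega) []
  simpa using h

lemma pv_main (lst : List String) :
    (pvProduct3 (pvOdds lst).length).map (fun ops => pvInterleave (pvEvens lst) ops)
      = generate_permutations_alt lst := by
  induction lst using pvEvens.induct with
  | case1 => decide
  | case2 a => simp [pvProduct3, pvOdds, pvEvens, pvInterleave, generate_permutations_alt]
  | case3 a b r ih =>
    simp only [pvEvens, pvOdds, List.length_cons, pvProduct3, generate_permutations_alt,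
      List.map_flatMap, List.map_map]
    congr 1
    funext o
    rw [← ih, List.map_map]
    apply List.map_congr_left
    intro t _
    simp [pvInterleave]

-- ===== VERDICT =====
theorem generate_permutations_spec : Claim_equal_generate_permutations := by
  intro lst _
  unfold Spec_generate_permutations
  rw [pv_A_char, pv_main]
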